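-- pv_equiv track=rewrite | github.com/NelsonAlmeida-18/adventOfCode2022 | day11/day11.py | top2Harambinos
-- ===== SOURCE A (Python) =====
-- def top2Harambinos(harambe):
--     harambeMaster, subHarambeMaster = 0, 0
--     for harambino in harambe:
--         if (harambe[harambino]["Inspections"] > harambeMaster):
--             subHarambeMaster = harambeMaster
--             harambeMaster = harambe[harambino]["Inspections"]
--         if (harambe[harambino]["Inspections"] < harambeMaster and harambe[harambino]["Inspections"] > subHarambeMaster):
--             subHarambeMaster = harambe[harambino]["Inspections"]
--     return harambeMaster*subHarambeMaster
-- ===== SOURCE B (Python) =====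
-- def top2Harambinos(harambe):
--     vals = [harambe[h]["Inspections"] for h in harambe]
--     top = max(vals + [0])
--     below = max([v for v in vals if v < top] + [0])
--     return top * below
-- ===== Notes on version B (the rewrite author's own statement) =====
-- stated objective: simpler
-- what changed: Replaces A's single scan carrying a (master, sub) pair of running maxima with a two-step decomposition: collect all inspection values, take their maximum floored at 0, then take the maximum of the values strictly below it, floored at 0, and multiply.
import Mathlib
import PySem

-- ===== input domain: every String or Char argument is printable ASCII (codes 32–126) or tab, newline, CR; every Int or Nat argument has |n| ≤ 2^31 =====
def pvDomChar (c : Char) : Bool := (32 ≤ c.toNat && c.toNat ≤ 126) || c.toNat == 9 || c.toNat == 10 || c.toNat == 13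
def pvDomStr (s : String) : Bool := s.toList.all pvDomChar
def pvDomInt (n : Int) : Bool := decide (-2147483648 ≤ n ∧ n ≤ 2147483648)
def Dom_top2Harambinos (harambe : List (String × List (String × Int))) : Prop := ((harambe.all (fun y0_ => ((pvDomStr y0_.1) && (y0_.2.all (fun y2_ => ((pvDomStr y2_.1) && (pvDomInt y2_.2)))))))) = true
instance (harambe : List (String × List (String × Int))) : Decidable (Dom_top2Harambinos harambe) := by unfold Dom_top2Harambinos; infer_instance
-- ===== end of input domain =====

-- B replaces A's carry-two single scan with two separate max-reductions (collect the
-- inspection values, take the maximum floored at 0, then the maximum of the values strictly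
-- below it, floored at 0); objective: simpler decomposition, same O(n) cost.

-- ===== PORT A =====
-- one loop body of A: v is harambe[harambino]["Inspections"], state = (harambeMaster, subHarambeMaster)
def top2AStep (st : Int × Int) (v : Int) : Int × Int :=
  let st1 := if v > st.1 then (v, st.1) else st
  if v < st1.1 ∧ v > st1.2 then (st1.1, v) else st1

def top2Harambinos (harambe : List (String × List (String × Int))) : Int :=
  let d := PySem.Dict.ofList harambe
  let st := d.keys.foldl
    (fun st k => top2AStep st ((PySem.Dict.ofList (d.getD k [])).getD "Inspections" 0)) (0, 0)
  st.1 * st.2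

-- ===== PORT B =====
def top2Harambinos_alt (harambe : List (String × List (String × Int))) : Int :=
  let d := PySem.Dict.ofList harambe
  let vals := d.keys.map (fun h => (PySem.Dict.ofList (d.getD h [])).getD "Inspections" 0)
  let top := (PySem.List.max? (vals ++ [0]) (fun y => y)).getD 0
  let below := (PySem.List.max? ((vals.filter (fun v => v < top)) ++ [0]) (fun y => y)).getD 0
  top * below

-- ===== PRECONDITION & SPEC =====
-- A raises KeyError iff some monkey dict (after Python's dict construction) lacks the key
-- "Inspections"; Pre_ admits exactly the inputs where every monkey dict carries that key.
def Pre_top2Harambinos (harambe : List (String × List (String × Int))) : Prop :=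
  ∀ p ∈ (PySem.Dict.ofList harambe).items, "Inspections" ∈ p.2.map Prod.fst
instance (harambe : List (String × List (String × Int))) : Decidable (Pre_top2Harambinos harambe) := by unfold Pre_top2Harambinos; infer_instance

def pvWitness_top2Harambinos : (List (String × List (String × Int))) :=
  [("a", [("Inspections", (3 : Int))]), ("b", [("Inspections", (5 : Int))])]

def Spec_top2Harambinos (harambe : List (String × List (String × Int))) (out : Int) : Prop := out = top2Harambinos_alt harambe
instance (harambe : List (String × List (String × Int))) (out : Int) : Decidable (Spec_top2Harambinos harambe out) := by unfold Spec_top2Harambinos; infer_instance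

-- ===== CLAIM (what is proved, stated in full; the proofs are below) =====
def Claim_equal_top2Harambinos : Prop := ∀ (harambe : List (String × List (String × Int))), Dom_top2Harambinos harambe → Pre_top2Harambinos harambe → Spec_top2Harambinos harambe (top2Harambinos harambe)

-- ===== LEMMAS AND PROOFS =====

-- Python max of a nonempty list (l + [0]) is the running max from 0.
lemma max?_append_zero (l : List Int) :
    (PySem.List.max? (l ++ [0]) (fun y => y)).getD 0 = l.foldl max 0 := by
  cases l with
  | nil => simp [PySem.List.max?]
  | cons x t =>
    rw [List.cons_append, PySem.List.max?_id_cons]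
    simp only [Option.getD_some, List.foldl_append, List.foldl_cons, List.foldl_nil]
    have h : t.foldl max (max 0 x) = max 0 (t.foldl max x) := List.foldl_assoc
    omega

-- Loop invariant of A's scan: starting from (m, s) with s ≤ m, the final master is the running
-- max of m over the values, and the final sub is the running max of s over those of m :: vals
-- strictly below the final master.
lemma aStep_fold (vals : List Int) : ∀ m s : Int, s ≤ m →
    vals.foldl top2AStep (m, s) =
      (vals.foldl max m,
       ((m :: vals).filter (fun v => decide (v < vals.foldl max m))).foldl max s) := by
  induction vals with
  | nil =>
    intro m s hsm
    simp
  | cons v tl ih =>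
    intro m s hsm
    have habs : ∀ a b : Int, tl.foldl max (max a b) = max a (tl.foldl max b) := fun a b => List.foldl_assoc
    by_cases h1 : v > m
    · -- first branch fires: state becomes (v, m); second branch cannot fire (v < v is false)
      have hstep : top2AStep (m, s) v = (v, m) := by
        simp [top2AStep, h1]
      have hM : tl.foldl max (max m v) = tl.foldl max v := by rw [max_eq_right (le_of_lt h1)]
      have hle : v ≤ tl.foldl max v := (PySem.List.le_foldl_max tl v).1
      rw [List.foldl_cons, hstep, ih v m (le_of_lt h1)]
      rw [List.foldl_cons, hM]
      have hmlt : m < tl.foldl max v := lt_of_lt_of_le h1 hle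
      have hm' : decide (m < tl.foldl max v) = true := by simpa using hmlt
      congr 1
      simp only [List.filter_cons, hm', if_true]
      by_cases hv : v < tl.foldl max v
      · have hv' : decide (v < tl.foldl max v) = true := by simpa using hv
        simp only [hv', if_true, List.foldl_cons]
        congr 1
        omega
      · have hv' : decide (v < tl.foldl max v) = false := by simpa using hv
        simp only [hv', Bool.false_eq_true, if_false, List.foldl_cons]
        congr 1
        omega
    · -- v ≤ m: master unchanged
      have hvm : v ≤ m := le_of_not_gt h1
      have hM : tl.foldl max (max m v) = tl.foldl max m := by rw [max_eq_left hvm]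
      have hmle : m ≤ tl.foldl max m := (PySem.List.le_foldl_max tl m).1
      by_cases h2 : v < m ∧ v > s
      · -- second branch fires: state becomes (m, v)
        have hstep : top2AStep (m, s) v = (m, v) := by
          simp [top2AStep, h1, h2.1, h2.2]
        rw [List.foldl_cons, hstep, ih m v (le_of_lt h2.1)]
        rw [List.foldl_cons, hM]
        have hvlt : v < tl.foldl max m := lt_of_lt_of_le h2.1 hmle
        have hv' : decide (v < tl.foldl max m) = true := by simpa using hvlt
        congr 1
        simp only [List.filter_cons, hv', if_true]
        by_cases hm : m < tl.foldl max m
        · have hm' : decide (m < tl.foldl max m) = true := by simpa using hm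
          simp only [hm', if_true, List.foldl_cons]
          congr 1
          omega
        · have hm' : decide (m < tl.foldl max m) = false := by simpa using hm
          simp only [hm', Bool.false_eq_true, if_false, List.foldl_cons]
          congr 1
          omega
      · -- no branch fires: state unchanged
        have hstep : top2AStep (m, s) v = (m, s) := by
          simp only [top2AStep, if_neg h1]
          exact if_neg h2
        rw [List.foldl_cons, hstep, ih m s hsm]
        rw [List.foldl_cons, hM]
        congr 1
        simp only [List.filter_cons]
        by_cases hm : m < tl.foldl max m
        · have hm' : decide (m < tl.foldl max m) = true := by simpa using hm
          by_cases hv : v < tl.foldl max m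
          · have hv' : decide (v < tl.foldl max m) = true := by simpa using hv
            simp only [hm', hv', if_true, List.foldl_cons]
            congr 1
            omega
          · have hv' : decide (v < tl.foldl max m) = false := by simpa using hv
            simp only [hm', hv', Bool.false_eq_true, if_true, if_false, List.foldl_cons]
        · have hm' : decide (m < tl.foldl max m) = false := by simpa using hm
          by_cases hv : v < tl.foldl max m
          · have hv' : decide (v < tl.foldl max m) = true := by simpa using hv
            simp only [hm', hv', Bool.false_eq_true, if_true, if_false, List.foldl_cons]
            congr 1
            omega
          · have hv' : decide (v < tl.foldl max m) = false := by simpa using hv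
            simp only [hm', hv', Bool.false_eq_true, if_false]

-- both products over an arbitrary value list agree
lemma main_vals (vals : List Int) :
    (vals.foldl top2AStep (0, 0)).1 * (vals.foldl top2AStep (0, 0)).2 =
      ((PySem.List.max? (vals ++ [0]) (fun y => y)).getD 0) *
      ((PySem.List.max? ((vals.filter (fun v => v <
          (PySem.List.max? (vals ++ [0]) (fun y => y)).getD 0)) ++ [0]) (fun y => y)).getD 0) := by
  rw [aStep_fold vals 0 0 le_rfl, max?_append_zero, max?_append_zero]
  set M := vals.foldl max 0 with hMdef
  congr 1
  rw [List.filter_cons]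
  by_cases h0 : (0 : Int) < M
  · rw [if_pos (by simpa using h0), List.foldl_cons]
    simp
  · rw [if_neg (by simpa using h0)]

-- ===== VERDICT (by name: the statement is the Claim_ definition above) =====
theorem top2Harambinos_spec : Claim_equal_top2Harambinos := by
  intro harambe _ _
  unfold Spec_top2Harambinos top2Harambinos top2Harambinos_alt
  dsimp only
  rw [← List.foldl_map]
  exact main_vals _
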